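-- pv_equiv track=rewrite | github.com/csmetrics/influencemap | core/search/parse_academic_search.py | or_query_builder_list
-- ===== SOURCE A (Python) =====
-- def or_query_builder_list(base_query, ids):
--     ''' or_query_builder, but returns a list of expressions to prevent url
--         being too long.
--     '''
--     query_list = list()
--     inputs = list() + ids
--     while inputs:
--         if len(inputs) > 1:
--             out = "Or({})"
--             sub_constraints = list()
--             # Incrementally add constraints
--             while len(', '.join(sub_constraints)) + len(out) < 1000 and inputs:
--                 sub_constraints.append(base_query.format(inputs.pop(0)))
--
--             out = out.format(", ".join(sub_constraints))
--         elif len(inputs) == 1: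
--             out = base_query.format(inputs.pop(0))
--         else:
--             out = ""
--
--         # Add current string
--         query_list.append(out)
--
--     return query_list
-- ===== SOURCE B (Python) =====
-- def or_query_builder_list(base_query, ids):
--     ''' Staged rewrite: pre-format all constraints, compute greedy chunk
--         sizes from their lengths alone, then slice and render; a chunk is
--         emitted bare iff it is the final chunk and holds a single item.
--     '''
--     cs = [base_query.format(x) for x in ids]
--     lens = [len(c) for c in cs]
--     # chunk sizes by a running joined-length counter (no joining, no slicing)
--     sizes = []
--     j = 0
--     while j < len(lens):
--         k, running = 0, 0
--         while j + k < len(lens) and running + 6 < 1000: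
--             running += lens[j + k] + (2 if k else 0)
--             k += 1
--         sizes.append(k)
--         j += k
--     # slice and render
--     out, rest = [], cs
--     for idx, k in enumerate(sizes):
--         chunk, rest = rest[:k], rest[k:]
--         if k == 1 and idx == len(sizes) - 1:
--             out.append(chunk[0])
--         else:
--             out.append("Or({})".format(", ".join(chunk)))
--     return out
-- ===== Notes on version B (the rewrite author's own statement) =====
-- stated objective: alternative
-- what changed: A interleaves formatting, chunking and rendering in one destructive pop(0) loop that re-joins the growing chunk to measure it and decides bareness at chunk start; B is staged: pre-format everything, compute greedy chunk sizes from the constraint lengths alone with a running counter, then slice the constraint list by those sizes and render, marking a chunk bare iff it is the last chunk and has size 1.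
-- outside the precondition, e.g. on or_query_builder_list('{0:>4}', ['ab', 'c']): A returns ['Or(  ab,    c)'], B returns ['Or(  ab,    c)']; on or_query_builder_list('{!r}', ['ab', 'c']): A returns ["Or('ab', 'c')"], B returns ["Or('ab', 'c')"]; on or_query_builder_list('{00}', ['a', 'b']): A returns ['Or(a, b)'], B returns ['Or(a, b)']
import Mathlib
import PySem

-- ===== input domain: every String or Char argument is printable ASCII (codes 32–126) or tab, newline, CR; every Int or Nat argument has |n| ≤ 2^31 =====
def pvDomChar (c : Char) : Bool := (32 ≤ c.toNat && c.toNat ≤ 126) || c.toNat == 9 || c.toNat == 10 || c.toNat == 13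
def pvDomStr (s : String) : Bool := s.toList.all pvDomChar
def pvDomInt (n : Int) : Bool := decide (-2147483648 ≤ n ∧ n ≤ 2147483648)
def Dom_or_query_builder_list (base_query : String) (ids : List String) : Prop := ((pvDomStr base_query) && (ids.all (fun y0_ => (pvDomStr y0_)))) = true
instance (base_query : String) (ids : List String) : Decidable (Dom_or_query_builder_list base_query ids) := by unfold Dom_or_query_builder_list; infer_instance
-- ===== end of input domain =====

-- B replaces A's single destructive pop(0) loop (format while popping, re-join the chunk to
-- measure it, decide bareness at chunk start) by staged passes: pre-format, compute greedy
-- chunk sizes from the lengths alone, slice by sizes and render. Same return value on Pre_.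

-- shared model of Python's base_query.format(x) for one positional string argument:
-- escapes '{{' '}}' and the fields '{}' / '{0}'. Exact on Pre_ (which admits only these
-- brace patterns); both Pythons call str.format element-wise, so the helper is shared.
def pvFmt (b x : List Char) : List Char :=
  match b with
  | '{' :: '{' :: rest => '{' :: pvFmt rest x
  | '}' :: '}' :: rest => '}' :: pvFmt rest x
  | '{' :: '}' :: rest => x ++ pvFmt rest x
  | '{' :: '0' :: '}' :: rest => x ++ pvFmt rest x
  | c :: rest => c :: pvFmt rest x
  | [] => []

-- ===== PORT A =====
-- ", ".join as A's inner loop re-computes it to measure the chunk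
def pvJoin : List (List Char) → List Char
  | [] => []
  | [x] => x
  | x :: y :: xs => x ++ ',' :: ' ' :: pvJoin (y :: xs)

-- A's inner while: pop and format while len(', '.join(sub)) + len("Or({})") < 1000
def takeChunkA (b : List Char) (sub : List (List Char)) : List (List Char) → List (List Char) × List (List Char)
  | [] => (sub, [])
  | x :: rest =>
    if (pvJoin sub).length + 6 < 1000 then takeChunkA b (sub ++ [pvFmt b x]) rest
    else (sub, x :: rest)

theorem takeChunkA_len (b : List Char) : ∀ (l : List (List Char)) (sub : List (List Char)),
    ((takeChunkA b sub l).2).length ≤ l.length := by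
  intro l
  induction l with
  | nil => intro sub; simp [takeChunkA]
  | cons x rest ih =>
    intro sub
    simp only [takeChunkA]
    split
    · exact Nat.le_trans (ih _) (Nat.le_succ _)
    · simp

theorem takeChunkA_lt (b x y : List Char) (rest : List (List Char)) :
    (takeChunkA b [] (x :: y :: rest)).2.length < (x :: y :: rest).length := by
  rw [takeChunkA, if_pos (by simp [pvJoin])]
  have h := takeChunkA_len b (y :: rest) ([] ++ [pvFmt b x])
  simp at h ⊢
  omega

-- A's outer while over the remaining inputs
def outerA (b : List Char) : List (List Char) → List (List Char)
  | [] => []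
  | [x] => [pvFmt b x]
  | x :: y :: rest =>
    let r := takeChunkA b [] (x :: y :: rest)
    ('O' :: 'r' :: '(' :: (pvJoin r.1 ++ [')'])) :: outerA b r.2
  termination_by l => l.length
  decreasing_by
    exact takeChunkA_lt b x y rest

def or_query_builder_list (base_query : String) (ids : List String) : List String :=
  (outerA base_query.toList (ids.map String.toList)).map String.ofList

-- ===== PORT B =====
-- B's counter loop: how many lengths fit in one chunk (running == joined length so far)
def grabK (running k : Nat) : List Nat → Nat
  | [] => k
  | l :: rest =>
    if running + 6 < 1000 then grabK (running + l + (if k = 0 then 0 else 2)) (k + 1) rest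
    else k

theorem grabK_ge : ∀ (l : List Nat) (running k : Nat), k ≤ grabK running k l := by
  intro l
  induction l with
  | nil => intro running k; simp [grabK]
  | cons a rest ih =>
    intro running k
    simp only [grabK]
    split
    · exact Nat.le_trans (Nat.le_succ _) (ih _ _)
    · exact Nat.le_refl _

theorem grabK_pos (a : Nat) (rest : List Nat) : 1 ≤ grabK 0 0 (a :: rest) := by
  rw [grabK, if_pos (by norm_num)]
  exact grabK_ge rest _ 1

-- B's chunk sizes, from the lengths alone
def sizesB : List Nat → List Nat
  | [] => []
  | a :: rest =>
    let k := grabK 0 0 (a :: rest)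
    k :: sizesB ((a :: rest).drop k)
  termination_by l => l.length
  decreasing_by
    have := grabK_pos a rest
    simp only [List.length_drop, List.length_cons]
    omega

-- B's ", ".join, folded left over the tail
def joinB : List (List Char) → List Char
  | [] => []
  | c :: cs => cs.foldl (fun acc d => acc ++ ',' :: ' ' :: d) c

-- B's slice-and-render pass ('idx == len(sizes)-1' becomes 'ks = []')
def renderB : List (List Char) → List Nat → List (List Char)
  | _, [] => []
  | cs, k :: ks =>
    (if k = 1 ∧ ks = [] then (cs.take k).headD []
     else 'O' :: 'r' :: '(' :: (joinB (cs.take k) ++ [')'])) :: renderB (cs.drop k) ks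

def or_query_builder_list_alt (base_query : String) (ids : List String) : List String :=
  (renderB (ids.map (fun s => pvFmt base_query.toList s.toList))
    (sizesB ((ids.map (fun s => pvFmt base_query.toList s.toList)).map List.length))).map String.ofList

-- ===== PRECONDITION & SPEC =====
-- brace-syntax scanner for a one-argument format call: counts '{}' (auto) and '{0}'
-- (manual) fields, none on any other brace use
def fmtScan : List Char → Option (Nat × Nat)
  | '{' :: '{' :: rest => fmtScan rest
  | '}' :: '}' :: rest => fmtScan rest
  | '{' :: '}' :: rest => (fmtScan rest).map (fun p => (p.1 + 1, p.2))
  | '{' :: '0' :: '}' :: rest => (fmtScan rest).map (fun p => (p.1, p.2 + 1))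
  | '{' :: _ => none
  | '}' :: _ => none
  | _ :: rest => fmtScan rest
  | [] => some (0, 0)

-- Pre_ excludes nonempty ids whose base_query's brace syntax makes str.format raise with one
-- argument (lone braces, auto/manual mixing, more than one '{}', indices ≥ 1, named fields)
-- and the well-formed fields beyond a plain '{}'/'{0}' (conversions '!r', format specs
-- ':>4', index spellings like '00'), whose replacement mini-language the ports do not model.
def fmtOk (s : List Char) : Bool :=
  match fmtScan s with
  | some (a, m) => a == 0 || (a == 1 && m == 0)
  | none => false

def Pre_or_query_builder_list (base_query : String) (ids : List String) : Prop :=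
  ids = [] ∨ fmtOk base_query.toList = true
instance (base_query : String) (ids : List String) : Decidable (Pre_or_query_builder_list base_query ids) := by
  unfold Pre_or_query_builder_list; infer_instance

def pvWitness_or_query_builder_list : String × List String :=
  ("Composite(AA.AuId={})", ["1", "22", "333"])

def Spec_or_query_builder_list (base_query : String) (ids : List String) (out : List String) : Prop := out = or_query_builder_list_alt base_query ids
instance (base_query : String) (ids : List String) (out : List String) : Decidable (Spec_or_query_builder_list base_query ids out) := by unfold Spec_or_query_builder_list; infer_instance

-- ===== CLAIM (what is proved, stated in full; the proofs are below) =====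
def Claim_equal_or_query_builder_list : Prop := ∀ (base_query : String) (ids : List String), Dom_or_query_builder_list base_query ids → Pre_or_query_builder_list base_query ids → Spec_or_query_builder_list base_query ids (or_query_builder_list base_query ids)

-- ===== LEMMAS AND PROOFS =====

theorem pvJoin_flatMap : ∀ (cs : List (List Char)) (c : List Char),
    pvJoin (c :: cs) = c ++ cs.flatMap (fun d => ',' :: ' ' :: d) := by
  intro cs
  induction cs with
  | nil => intro c; simp [pvJoin]
  | cons y ys ih => intro c; simp [pvJoin, ih y]

theorem joinB_eq_pvJoin (cs : List (List Char)) : joinB cs = pvJoin cs := by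
  cases cs with
  | nil => rfl
  | cons c cs =>
    rw [joinB, pvJoin_flatMap]
    exact PySem.List.foldl_append_eq_flatMap (fun d => ',' :: ' ' :: d) cs c

theorem pvJoin_append (c : List Char) : ∀ (sub : List (List Char)),
    (pvJoin (sub ++ [c])).length =
      if sub.isEmpty then c.length else (pvJoin sub).length + c.length + 2 := by
  intro sub
  induction sub with
  | nil => simp [pvJoin]
  | cons x xs ih =>
    cases xs with
    | nil => simp [pvJoin]; omega
    | cons y ys =>
      simp only [List.cons_append, pvJoin, List.length_append, List.length_cons,
        List.isEmpty_cons, Bool.false_eq_true, if_false] at ih ⊢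
      omega

-- inner correspondence: B's counter over the lengths computes the size of A's chunk
theorem take_eq_grab (b : List Char) : ∀ (l sub : List (List Char)),
    takeChunkA b sub l =
      (sub ++ (l.map (pvFmt b)).take
          (grabK (pvJoin sub).length sub.length ((l.map (pvFmt b)).map List.length) - sub.length),
       l.drop (grabK (pvJoin sub).length sub.length ((l.map (pvFmt b)).map List.length) - sub.length)) := by
  intro l
  induction l with
  | nil => intro sub; simp [takeChunkA, grabK]
  | cons x rest ih =>
    intro sub
    simp only [List.map_cons, takeChunkA, grabK]
    split
    · -- the shared cap test succeeded
      have hrun : (pvJoin sub).length + (pvFmt b x).length + (if sub.length = 0 then 0 else 2)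
          = (pvJoin (sub ++ [pvFmt b x])).length := by
        rw [pvJoin_append]
        cases sub <;> simp [pvJoin]
      rw [hrun, ih (sub ++ [pvFmt b x])]
      have hK := grabK_ge (((rest.map (pvFmt b)).map List.length))
        (pvJoin (sub ++ [pvFmt b x])).length (sub.length + 1)
      set K := grabK (pvJoin (sub ++ [pvFmt b x])).length (sub.length + 1)
        ((rest.map (pvFmt b)).map List.length) with hKdef
      have h1 : (sub ++ [pvFmt b x]).length = sub.length + 1 := by simp
      have h2 : K - sub.length = (K - (sub.length + 1)) + 1 := by omega
      rw [h1, h2, List.take_succ_cons, List.drop_succ_cons, ← List.append_cons]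
    · simp

theorem sizesB_cons (a : Nat) (rest : List Nat) :
    sizesB (a :: rest) =
      grabK 0 0 (a :: rest) :: sizesB ((a :: rest).drop (grabK 0 0 (a :: rest))) := by
  rw [sizesB]

-- outer correspondence, by strong induction on the list length
theorem render_eq_outer (b : List Char) : ∀ (n : Nat) (l : List (List Char)), l.length ≤ n →
    renderB (l.map (pvFmt b)) (sizesB ((l.map (pvFmt b)).map List.length)) = outerA b l := by
  intro n
  induction n with
  | zero =>
    intro l hl
    have : l = [] := List.eq_nil_of_length_eq_zero (Nat.le_zero.mp hl)
    subst this; simp [sizesB, renderB, outerA]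
  | succ m ih =>
    intro l hl
    match l with
    | [] => simp [sizesB, renderB, outerA]
    | [x] => simp [sizesB_cons, sizesB, grabK, renderB, outerA]
    | x :: y :: rest =>
      have hgrab := take_eq_grab b (x :: y :: rest) []
      simp only [pvJoin, List.length_nil, List.nil_append, List.map_cons, Nat.sub_zero] at hgrab
      simp only [List.map_cons]
      rw [sizesB_cons]
      set lens : List Nat :=
        (pvFmt b x).length :: (pvFmt b y).length :: (rest.map (pvFmt b)).map List.length
        with hlens
      set k := grabK 0 0 lens with hk
      have hk1 : 1 ≤ k := by rw [hk, hlens]; exact grabK_pos _ _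
      rw [renderB]
      have hcond : ¬ (k = 1 ∧ sizesB (lens.drop k) = []) := by
        rintro ⟨h1, h2⟩
        rw [h1, hlens] at h2
        simp [sizesB_cons] at h2
      rw [if_neg hcond]
      have hmapdrop : ((x :: y :: rest).drop k).map (pvFmt b)
          = (pvFmt b x :: pvFmt b y :: rest.map (pvFmt b)).drop k := by
        rw [List.map_drop]; simp
      have hlendrop : (((x :: y :: rest).drop k).map (pvFmt b)).map List.length
          = lens.drop k := by
        rw [hmapdrop, hlens, List.map_drop]; simp
      have hrec : renderB ((pvFmt b x :: pvFmt b y :: rest.map (pvFmt b)).drop k)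
            (sizesB (lens.drop k)) = outerA b ((x :: y :: rest).drop k) := by
        rw [← hmapdrop, ← hlendrop]
        refine ih _ ?_
        simp only [List.length_drop, List.length_cons] at hl ⊢
        omega
      rw [outerA, hgrab]
      simp only [joinB_eq_pvJoin]
      rw [hrec]
-- ===== VERDICT (by name: the statement is the Claim_ definition above) =====
theorem or_query_builder_list_spec : Claim_equal_or_query_builder_list := by
  intro base_query ids _ _
  unfold Spec_or_query_builder_list or_query_builder_list or_query_builder_list_alt
  rw [show (fun s => pvFmt base_query.toList s.toList) = (pvFmt base_query.toList) ∘ String.toList from rfl,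
    ← List.map_map, render_eq_outer base_query.toList (ids.map String.toList).length _ le_rfl]
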